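-- pv_equiv track=rewrite | github.com/rec/grit | grit/Dict.py | compose_on_keys
-- ===== SOURCE A (Python) =====
-- def compose_on_keys(keys, dicts):
--     """Compose dictionaries on a list of keys we understand."""
--     settings = {}
--
--     for key in keys:
--         for d in dicts:
--             value = d.get(key)
--             if value:
--                 settings[key] = value
--                 break
--     return settings
-- ===== SOURCE B (Python) =====
-- def compose_on_keys(keys, dicts):
--     """Compose dictionaries on a list of keys we understand."""
--     # Pass 1: sweep the dicts back-to-front, overwriting, so that for each key
--     # the surviving value is the first truthy one in the original dict order.
--     found = {}
--     for d in reversed(dicts):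
--         for key in keys:
--             value = d.get(key)
--             if value:
--                 found[key] = value
--     # Pass 2: emit in key order, as the original insertion order demands.
--     return {key: found[key] for key in keys if key in found}
-- ===== Notes on version B (the rewrite author's own statement) =====
-- stated objective: alternative
-- what changed: A searches the dicts per key with an early break; B makes one overwriting sweep over the dicts in reversed order (keys inner, no break) so the first truthy value survives, then emits the results in key order.
import Mathlib
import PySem

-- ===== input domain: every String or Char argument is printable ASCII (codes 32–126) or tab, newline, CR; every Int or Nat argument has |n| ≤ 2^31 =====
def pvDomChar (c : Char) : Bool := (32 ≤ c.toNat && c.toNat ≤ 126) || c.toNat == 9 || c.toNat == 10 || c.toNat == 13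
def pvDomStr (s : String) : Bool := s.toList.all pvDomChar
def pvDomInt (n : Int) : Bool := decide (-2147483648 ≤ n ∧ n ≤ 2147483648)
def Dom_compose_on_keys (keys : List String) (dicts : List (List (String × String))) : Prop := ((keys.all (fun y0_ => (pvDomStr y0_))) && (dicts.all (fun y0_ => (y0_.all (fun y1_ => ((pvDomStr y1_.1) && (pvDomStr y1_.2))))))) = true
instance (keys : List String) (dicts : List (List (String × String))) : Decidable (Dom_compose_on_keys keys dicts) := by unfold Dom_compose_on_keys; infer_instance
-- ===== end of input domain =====

-- B replaces A's per-key search with an early break by a reversed overwriting sweep over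
-- the dicts plus a key-ordered emission pass (alternative decomposition, same cost).

-- ===== PORT A =====
-- inner loop: 'for d in dicts: value = d.get(key); if value: settings[key] = value; break'
def aInner (settings : PySem.Dict String String) (key : String) :
    List (List (String × String)) → PySem.Dict String String
  | [] => settings
  | d :: rest =>
    match (PySem.Dict.ofList d).get? key with
    | some v => if v ≠ "" then settings.insert key v else aInner settings key rest
    | none => aInner settings key rest

def compose_on_keys (keys : List String) (dicts : List (List (String × String))) :
    List (String × String) :=
  (keys.foldl (fun settings key => aInner settings key dicts) PySem.Dict.empty).items

-- ===== PORT B =====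
-- body of the inner loop: 'value = d.get(key); if value: found[key] = value'
def bStep (d : List (String × String)) (found : PySem.Dict String String)
    (key : String) : PySem.Dict String String :=
  match (PySem.Dict.ofList d).get? key with
  | some v => if v ≠ "" then found.insert key v else found
  | none => found

-- inner loop: 'for key in keys: …'
def bSweep (keys : List String) (found : PySem.Dict String String)
    (d : List (String × String)) : PySem.Dict String String :=
  keys.foldl (bStep d) found

def compose_on_keys_alt (keys : List String) (dicts : List (List (String × String))) :
    List (String × String) :=
  let found := dicts.reverse.foldl (fun found d => bSweep keys found d) PySem.Dict.empty
  (keys.foldl (fun r key =>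
    match found.get? key with
    | some v => r.insert key v
    | none => r) PySem.Dict.empty).items

-- ===== PRECONDITION & SPEC =====
def Spec_compose_on_keys (keys : List String) (dicts : List (List (String × String))) (out : List (String × String)) : Prop := out = compose_on_keys_alt keys dicts
instance (keys : List String) (dicts : List (List (String × String))) (out : List (String × String)) : Decidable (Spec_compose_on_keys keys dicts out) := by unfold Spec_compose_on_keys; infer_instance

-- ===== CLAIM (what is proved, stated in full; the proofs are below) =====
def Claim_equal_compose_on_keys : Prop := ∀ (keys : List String) (dicts : List (List (String × String))), Dom_compose_on_keys keys dicts → Spec_compose_on_keys keys dicts (compose_on_keys keys dicts)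

-- ===== LEMMAS AND PROOFS =====

-- the first truthy value a key gets from the dict list (A's inner loop as an Option)
def firstTruthy (key : String) : List (List (String × String)) → Option String
  | [] => none
  | d :: rest =>
    match (PySem.Dict.ofList d).get? key with
    | some v => if v ≠ "" then some v else firstTruthy key rest
    | none => firstTruthy key rest

theorem aInner_eq (settings : PySem.Dict String String) (key : String)
    (ds : List (List (String × String))) :
    aInner settings key ds =
      match firstTruthy key ds with
      | some v => settings.insert key v
      | none => settings := by
  induction ds with
  | nil => rfl
  | cons d rest ih =>
    simp only [aInner, firstTruthy]
    cases (PySem.Dict.ofList d).get? key with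
    | none => exact ih
    | some v => by_cases hv : v = "" <;> simp [hv, ih]

theorem bStep_get?_ne (d : List (String × String)) (g : PySem.Dict String String)
    (k key : String) (hne : key ≠ k) :
    (bStep d g k).get? key = g.get? key := by
  unfold bStep
  cases (PySem.Dict.ofList d).get? k with
  | none => rfl
  | some v =>
    by_cases hv : v = "" <;> simp [hv, PySem.Dict.get?_insert, hne]

-- a sweep over keys not containing `key` never touches `key`
theorem bSweep_get?_not_mem (keys : List String) (d : List (String × String))
    (key : String) (hk : key ∉ keys) (g : PySem.Dict String String) :
    (bSweep keys g d).get? key = g.get? key := by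
  induction keys generalizing g with
  | nil => rfl
  | cons k ks ih =>
    simp only [bSweep, List.foldl_cons] at *
    rw [ih (fun h => hk (List.mem_cons_of_mem _ h)),
        bStep_get?_ne d g k key (fun h => hk (h ▸ List.mem_cons_self ..))]

-- one sweep writes d's truthy value at key (if any), else leaves key alone
theorem bSweep_get? (keys : List String) (d : List (String × String)) (key : String)
    (hk : key ∈ keys) (g : PySem.Dict String String) :
    (bSweep keys g d).get? key =
      match (PySem.Dict.ofList d).get? key with
      | some v => if v ≠ "" then some v else g.get? key
      | none => g.get? key := by
  induction keys generalizing g with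
  | nil => cases hk
  | cons k ks ih =>
    simp only [bSweep, List.foldl_cons] at *
    by_cases hmem : key ∈ ks
    · rw [ih hmem]
      cases hd : (PySem.Dict.ofList d).get? key with
      | none =>
        by_cases hkk : key = k
        · subst hkk; unfold bStep; simp [hd]
        · exact bStep_get?_ne d g k key hkk
      | some v =>
        by_cases hv : v = ""
        · simp only [hv, ne_eq, not_true_eq_false, if_false]
          by_cases hkk : key = k
          · subst hkk; unfold bStep; simp [hd, hv]
          · exact bStep_get?_ne d g k key hkk
        · simp [hv]
    · have hkk : key = k := by
        rcases List.mem_cons.mp hk with h | h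
        · exact h
        · exact absurd h hmem
      subst hkk
      rw [show List.foldl (bStep d) (bStep d g key) ks = bSweep ks (bStep d g key) d from rfl,
          bSweep_get?_not_mem ks d key hmem]
      unfold bStep
      cases hd : (PySem.Dict.ofList d).get? key with
      | none => simp
      | some v =>
        by_cases hv : v = "" <;> simp [hv, PySem.Dict.get?_insert_self]

-- the whole reversed sweep computes firstTruthy on every scanned key
theorem found_get? (keys : List String) (ds : List (List (String × String)))
    (key : String) (hk : key ∈ keys) (f : PySem.Dict String String) :
    (ds.foldr (fun d g => bSweep keys g d) f).get? key =
      match firstTruthy key ds with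
      | some v => some v
      | none => f.get? key := by
  induction ds with
  | nil => rfl
  | cons d rest ih =>
    simp only [List.foldr_cons, firstTruthy]
    rw [bSweep_get? keys d key hk]
    cases hd : (PySem.Dict.ofList d).get? key with
    | none => exact ih
    | some v => by_cases hv : v = "" <;> simp [hv, ih]

-- ===== VERDICT (by name: the statement is the Claim_ definition above) =====
theorem compose_on_keys_spec : Claim_equal_compose_on_keys := by
  intro keys dicts _
  unfold Spec_compose_on_keys compose_on_keys compose_on_keys_alt
  rw [List.foldl_reverse]
  congr 1
  apply PySem.List.foldl_congr_mem
  intro s key hk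
  rw [aInner_eq, found_get? keys dicts key hk PySem.Dict.empty]
  cases firstTruthy key dicts <;> simp [PySem.Dict.get?_empty]
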